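-- pv_equiv track=rewrite | github.com/nilc-nlp/Sumarisandro | summary/utils/CONLL.py | map_CoNLL_tags
-- ===== SOURCE A (Python) =====
-- def map_CoNLL_tags(tags):
--     """
--     Identify the position of ')' simbol in the array "tags".
--     This is necessary to determine the words between "(" and ")".
--
--         Sentence:
--         ---------
--         O primo Favio comprou um frango para comer de noite.
--
--         input:
--         ------
--             0: ("(A0", 0)
--             1: (")", 2),
--             2: ("(A1", 4)
--             3: (")", 6)
--             4: ("(AM-TMP", 8)
--             5: (")", 9)
--
--         output:
--         -------
--         [("(A0", 0, 1), (")", 2, -1), ("(A1", 4, 3), (")", 6, -1),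
--         ("(AM-TMP", 8, 5), (")", 9, -1)]
--
--     Then ("(A0", 0, 1) -> (")", 2, -1) means that "O primo Favio" (0, 2)
--     were tagged with the label "A0".
--
--     """
--     new = []
--     for i in range(len(tags)):
--         # Add position 'j' if the simbol is '(' (open)
--         if tags[i][0].find('(') > -1:
--             # Initialize breakers
--             A, B = 1, 0
--             for j in range(i + 1, len(tags)):
--                 # Identifier open simbol '('
--                 if tags[j][0].find('(') > -1:
--                     A += 1
--                 # Identifier close simbol ')'
--                 if tags[j][0].find(')') > -1:
--                     B += 1
--                 # Means that simbol ')' closes simbol '('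
--                 if A - B == 0:
--                     new.append((tags[i][0], tags[i][1], j))
--                     break
--         # Add position '-1' if the simbol is ')' (close)
--         else:
--             new.append((tags[i][0], tags[i][1], -1))
--
--     return new
-- ===== SOURCE B (Python) =====
-- def map_CoNLL_tags(tags):
--     # Single backward pass: `drops` is a stack whose top (last element) is the
--     # position where the balance of the suffix after the current index first
--     # drops by one -- exactly the closer of an opening tag at the current index.
--     out = []
--     drops = []
--     for k in range(len(tags) - 1, -1, -1):
--         s, p = tags[k]
--         has_o = '(' in s
--         has_c = ')' in s
--         if has_o:
--             if drops:
--                 out.append((s, p, drops[-1]))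
--             # an opening tag with no closer is omitted, as in the original
--         else:
--             out.append((s, p, -1))
--         if has_o and not has_c:
--             if drops:
--                 drops.pop()
--         elif has_c and not has_o:
--             drops.append(k)
--     out.reverse()
--     return out
-- ===== Notes on version B (the rewrite author's own statement) =====
-- stated objective: faster
-- what changed: Replaced A's per-opening-tag forward rescan (nested loop with open/close counters) by a single backward pass that maintains a stack of 'first balance-drop' positions, reading each opener's closer off the top of the stack.
import Mathlib
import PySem

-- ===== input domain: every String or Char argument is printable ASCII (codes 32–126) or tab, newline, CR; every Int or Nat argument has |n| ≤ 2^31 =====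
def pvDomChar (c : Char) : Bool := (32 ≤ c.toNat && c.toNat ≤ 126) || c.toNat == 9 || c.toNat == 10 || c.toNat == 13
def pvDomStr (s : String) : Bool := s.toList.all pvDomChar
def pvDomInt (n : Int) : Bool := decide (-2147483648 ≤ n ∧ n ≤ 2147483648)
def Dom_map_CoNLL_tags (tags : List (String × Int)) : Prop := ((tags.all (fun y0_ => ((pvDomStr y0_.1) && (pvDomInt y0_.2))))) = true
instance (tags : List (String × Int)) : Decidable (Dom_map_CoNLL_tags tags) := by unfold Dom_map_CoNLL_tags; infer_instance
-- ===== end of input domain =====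

-- B replaces A's per-opener forward rescan by ONE backward pass with a stack of
-- "first balance-drop" positions.

-- ===== PORT A =====
-- inner `for j in range(i+1, len(tags))` loop of A, with its A/B counters
def innerA (tags : List (String × Int)) (n : Nat) (A B : Int) (j : Nat) : Option Nat :=
  if j < n then
    let s := (tags.getD j ("", 0)).1
    let A' := if PySem.Str.find s "(" > -1 then A + 1 else A
    let B' := if PySem.Str.find s ")" > -1 then B + 1 else B
    if A' - B' = 0 then some j else innerA tags n A' B' (j + 1)
  else none
termination_by n - j

def map_CoNLL_tags (tags : List (String × Int)) : List (String × Int × Int) :=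
  (List.range tags.length).foldl (fun new i =>
    let t := tags.getD i ("", 0)
    if PySem.Str.find t.1 "(" > -1 then
      match innerA tags tags.length 1 0 (i + 1) with
      | some j => new ++ [(t.1, t.2, (j : Int))]
      | none => new
    else new ++ [(t.1, t.2, -1)]) []

-- ===== PORT B =====
-- the `for k in range(len(tags)-1, -1, -1)` loop of Source B; counter k+1 processes index k
def loopB (tags : List (String × Int)) (k : Nat) (drops : List Nat)
    (out : List (String × Int × Int)) : List (String × Int × Int) :=
  match k with
  | 0 => out
  | k + 1 =>
    let t := tags.getD k ("", 0)
    let hasO := PySem.Str.isIn "(" t.1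
    let hasC := PySem.Str.isIn ")" t.1
    let out' :=
      if hasO then
        match drops.getLast? with          -- `if drops: out.append((s, p, drops[-1]))`
        | some j => out ++ [(t.1, t.2, (j : Int))]
        | none => out
      else out ++ [(t.1, t.2, -1)]
    let drops' :=
      if hasO && !hasC then drops.dropLast -- `if drops: drops.pop()`
      else if hasC && !hasO then drops ++ [k]
      else drops
    loopB tags k drops' out'

def map_CoNLL_tags_alt (tags : List (String × Int)) : List (String × Int × Int) :=
  (loopB tags tags.length [] []).reverse

-- ===== PRECONDITION & SPEC =====
def Spec_map_CoNLL_tags (tags : List (String × Int)) (out : List (String × Int × Int)) : Prop := out = map_CoNLL_tags_alt tags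
instance (tags : List (String × Int)) (out : List (String × Int × Int)) : Decidable (Spec_map_CoNLL_tags tags out) := by unfold Spec_map_CoNLL_tags; infer_instance

-- ===== CLAIM (what is proved, stated in full; the proofs are below) =====
def Claim_equal_map_CoNLL_tags : Prop := ∀ (tags : List (String × Int)), Dom_map_CoNLL_tags tags → Spec_map_CoNLL_tags tags (map_CoNLL_tags tags)

-- ===== LEMMAS AND PROOFS =====

-- weight of entry j: +1 if it contains '(', -1 if it contains ')' (both → 0)
def wt (tags : List (String × Int)) (j : Nat) : Int :=
  (if PySem.Str.isIn "(" (tags.getD j ("", 0)).1 then 1 else 0)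
  - (if PySem.Str.isIn ")" (tags.getD j ("", 0)).1 then 1 else 0)

-- first j' with j ≤ j' < n at which the running balance d + Σ wt reaches 0
def gMatch (tags : List (String × Int)) (n : Nat) (d : Int) (j : Nat) : Option Nat :=
  if j < n then
    if d + wt tags j = 0 then some j else gMatch tags n (d + wt tags j) (j + 1)
  else none
termination_by n - j

-- spec of B's `drops` stack read front-first (front = nearest drop), for the suffix from j
def dropsSpec (tags : List (String × Int)) (n : Nat) (j : Nat) : List Nat :=
  if j < n then
    if PySem.Str.isIn "(" (tags.getD j ("", 0)).1 && !PySem.Str.isIn ")" (tags.getD j ("", 0)).1 then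
      (dropsSpec tags n (j + 1)).tail
    else if PySem.Str.isIn ")" (tags.getD j ("", 0)).1 && !PySem.Str.isIn "(" (tags.getD j ("", 0)).1 then
      j :: dropsSpec tags n (j + 1)
    else dropsSpec tags n (j + 1)
  else []
termination_by n - j

-- the block of output produced for index i: the common normal form of A and B
def blockF (tags : List (String × Int)) (n : Nat) (i : Nat) : List (String × Int × Int) :=
  if PySem.Str.isIn "(" (tags.getD i ("", 0)).1 then
    match gMatch tags n 1 (i + 1) with
    | some j => [((tags.getD i ("", 0)).1, (tags.getD i ("", 0)).2, (j : Int))]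
    | none => []
  else [((tags.getD i ("", 0)).1, (tags.getD i ("", 0)).2, -1)]

-- A's substring test `s.find(sub) > -1` is B's `sub in s`
lemma find_pos_iff (s sub : String) :
    (PySem.Str.find s sub > -1) ↔ (PySem.Str.isIn sub s = true) := by
  have h1 : PySem.Str.find s sub > -1 ↔ 0 ≤ PySem.Str.find s sub := by
    constructor <;> intro h <;> omega
  rw [h1]
  simp [pysem]

lemma innerA_eq_gMatch (tags : List (String × Int)) (n : Nat) :
    ∀ j A B, innerA tags n A B j = gMatch tags n (A - B) j := by
  suffices H : ∀ k j A B, n - j = k → innerA tags n A B j = gMatch tags n (A - B) j by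
    intro j A B; exact H (n - j) j A B rfl
  intro k
  induction k with
  | zero =>
    intro j A B hk
    have hj : ¬ j < n := by omega
    rw [innerA, gMatch]
    simp [hj]
  | succ k ih =>
    intro j A B hk
    by_cases hj : j < n
    · have hk' : n - (j + 1) = k := by omega
      rw [innerA, gMatch]
      simp only [hj, if_true]
      have hAB : (if PySem.Str.find (tags.getD j ("", 0)).1 "(" > -1 then A + 1 else A)
          - (if PySem.Str.find (tags.getD j ("", 0)).1 ")" > -1 then B + 1 else B)
          = A - B + wt tags j := by
        rw [wt]
        by_cases f1 : PySem.Str.find (tags.getD j ("", 0)).1 "(" > -1 <;>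
          by_cases f2 : PySem.Str.find (tags.getD j ("", 0)).1 ")" > -1
        · rw [if_pos f1, if_pos f2, if_pos ((find_pos_iff _ _).mp f1),
            if_pos ((find_pos_iff _ _).mp f2)]
          ring
        · rw [if_pos f1, if_neg f2, if_pos ((find_pos_iff _ _).mp f1),
            if_neg (fun hc => f2 ((find_pos_iff _ _).mpr hc))]
          ring
        · rw [if_neg f1, if_pos f2, if_neg (fun hc => f1 ((find_pos_iff _ _).mpr hc)),
            if_pos ((find_pos_iff _ _).mp f2)]
          ring
        · rw [if_neg f1, if_neg f2, if_neg (fun hc => f1 ((find_pos_iff _ _).mpr hc)),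
            if_neg (fun hc => f2 ((find_pos_iff _ _).mpr hc))]
          ring
      rw [ih (j + 1) _ _ hk', hAB]
    · rw [innerA, gMatch]
      simp [hj]

lemma innerA_one (tags : List (String × Int)) (n j : Nat) :
    innerA tags n 1 0 j = gMatch tags n 1 j := by
  simpa using innerA_eq_gMatch tags n j 1 0

lemma dropsSpec_get (tags : List (String × Int)) (n : Nat) :
    ∀ (j q : Nat), (dropsSpec tags n j)[q]? = gMatch tags n ((q : Int) + 1) j := by
  suffices H : ∀ k j, n - j = k → ∀ q : Nat,
      (dropsSpec tags n j)[q]? = gMatch tags n ((q : Int) + 1) j by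
    intro j q; exact H (n - j) j rfl q
  intro k
  induction k with
  | zero =>
    intro j hk q
    have hj : ¬ j < n := by omega
    rw [dropsSpec, gMatch]
    simp [hj]
  | succ k ih =>
    intro j hk q
    by_cases hj : j < n
    · have hk' : n - (j + 1) = k := by omega
      rw [dropsSpec, gMatch]
      simp only [hj, if_true]
      cases h1 : PySem.Str.isIn "(" (tags.getD j ("", 0)).1 <;>
        cases h2 : PySem.Str.isIn ")" (tags.getD j ("", 0)).1
      · -- neither: weight 0
        have hw : wt tags j = 0 := by rw [wt, h1, h2]; decide
        rw [hw, if_neg (show ¬((false && !false) = true) by decide),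
          if_neg (show ¬((false && !false) = true) by decide),
          if_neg (show ¬((q : Int) + 1 + 0 = 0) by omega), ih (j + 1) hk' q]
        norm_num
      · -- ')' only: weight -1, cons
        have hw : wt tags j = -1 := by rw [wt, h1, h2]; decide
        rw [hw, if_neg (show ¬((false && !true) = true) by decide),
          if_pos (show (true && !false) = true by decide)]
        cases q with
        | zero => norm_num
        | succ q =>
          rw [if_neg (show ¬((((q + 1 : Nat)) : Int) + 1 + -1 = 0) by push_cast; omega),
            List.getElem?_cons_succ, ih (j + 1) hk' q]
          congr 1
          push_cast
          ring
      · -- '(' only: weight 1, tail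
        have hw : wt tags j = 1 := by rw [wt, h1, h2]; decide
        rw [hw, if_pos (show (true && !false) = true by decide), List.getElem?_tail,
          ih (j + 1) hk' (q + 1), if_neg (show ¬((q : Int) + 1 + 1 = 0) by omega)]
        exact congrArg (fun d => gMatch tags n d (j + 1))
          (show ((q + 1 : Nat) : Int) + 1 = (q : Int) + 1 + 1 by push_cast; ring)
      · -- both: weight 0
        have hw : wt tags j = 0 := by rw [wt, h1, h2]; decide
        rw [hw, if_neg (show ¬((true && !true) = true) by decide),
          if_neg (show ¬((true && !true) = true) by decide),
          if_neg (show ¬((q : Int) + 1 + 0 = 0) by omega), ih (j + 1) hk' q]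
        norm_num
    · rw [dropsSpec, gMatch]
      simp [hj]

-- A's loop body as a named function (definitionally the lambda in map_CoNLL_tags)
def stepP (tags : List (String × Int)) (new : List (String × Int × Int)) (i : Nat) :
    List (String × Int × Int) :=
  let t := tags.getD i ("", 0)
  if PySem.Str.find t.1 "(" > -1 then
    match innerA tags tags.length 1 0 (i + 1) with
    | some j => new ++ [(t.1, t.2, (j : Int))]
    | none => new
  else new ++ [(t.1, t.2, -1)]

lemma stepP_eq (tags : List (String × Int)) (new : List (String × Int × Int)) (i : Nat) :
    stepP tags new i = new ++ blockF tags tags.length i := by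
  rw [stepP, blockF]
  simp only [innerA_one]
  by_cases h : PySem.Str.isIn "(" (tags.getD i ("", 0)).1
  · rw [if_pos ((find_pos_iff _ _).mpr h), if_pos h]
    cases gMatch tags tags.length 1 (i + 1) <;> simp
  · rw [if_neg (fun hc => h ((find_pos_iff _ _).mp hc)), if_neg h]

lemma foldlA (tags : List (String × Int)) (l : List Nat) :
    ∀ init, l.foldl (stepP tags) init = init ++ l.flatMap (blockF tags tags.length) := by
  induction l with
  | nil => intro init; simp
  | cons i l ih =>
    intro init
    simp only [List.foldl_cons, List.flatMap_cons, stepP_eq, ih, List.append_assoc]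

lemma mapA_eq_flatMap (tags : List (String × Int)) :
    map_CoNLL_tags tags = (List.range tags.length).flatMap (blockF tags tags.length) := by
  have h : map_CoNLL_tags tags = (List.range tags.length).foldl (stepP tags) [] := rfl
  rw [h, foldlA]
  simp

lemma loopB_eq (tags : List (String × Int)) (n : Nat) :
    ∀ k, k ≤ n → ∀ out, loopB tags k ((dropsSpec tags n k).reverse) out
      = out ++ (List.range k).reverse.flatMap (blockF tags n) := by
  intro k
  induction k with
  | zero => intro _ out; simp [loopB]
  | succ k ih =>
    intro hk out
    have hkn : k < n := hk
    have hglast : ((dropsSpec tags n (k + 1)).reverse).getLast? = gMatch tags n 1 (k + 1) := by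
      rw [List.getLast?_reverse, List.head?_eq_getElem?]
      simpa using dropsSpec_get tags n (k + 1) 0
    rw [loopB]
    simp only [hglast]
    have hdrops : (if PySem.Str.isIn "(" (tags.getD k ("", 0)).1 && !PySem.Str.isIn ")" (tags.getD k ("", 0)).1
          then ((dropsSpec tags n (k + 1)).reverse).dropLast
        else if PySem.Str.isIn ")" (tags.getD k ("", 0)).1 && !PySem.Str.isIn "(" (tags.getD k ("", 0)).1
          then (dropsSpec tags n (k + 1)).reverse ++ [k]
        else (dropsSpec tags n (k + 1)).reverse)
        = (dropsSpec tags n k).reverse := by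
      conv_rhs => rw [dropsSpec]
      rw [if_pos hkn]
      cases h1 : PySem.Str.isIn "(" (tags.getD k ("", 0)).1 <;>
        cases h2 : PySem.Str.isIn ")" (tags.getD k ("", 0)).1 <;>
        simp [List.dropLast_reverse]
    have hout : (if PySem.Str.isIn "(" (tags.getD k ("", 0)).1 then
          match gMatch tags n 1 (k + 1) with
          | some j => out ++ [((tags.getD k ("", 0)).1, (tags.getD k ("", 0)).2, (j : Int))]
          | none => out
        else out ++ [((tags.getD k ("", 0)).1, (tags.getD k ("", 0)).2, -1)])
        = out ++ blockF tags n k := by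
      rw [blockF]
      by_cases h : PySem.Str.isIn "(" (tags.getD k ("", 0)).1
      · rw [if_pos h, if_pos h]
        cases gMatch tags n 1 (k + 1) <;> simp
      · rw [if_neg h, if_neg h]
    rw [hdrops, hout, ih (Nat.le_of_succ_le hk) (out ++ blockF tags n k)]
    rw [List.range_succ, List.reverse_append]
    simp [List.append_assoc]

lemma blockF_reverse (tags : List (String × Int)) (n i : Nat) :
    (blockF tags n i).reverse = blockF tags n i := by
  rw [blockF]
  by_cases h : PySem.Str.isIn "(" (tags.getD i ("", 0)).1
  · rw [if_pos h]
    cases gMatch tags n 1 (i + 1) <;> simp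
  · rw [if_neg h]; simp

lemma mapB_eq_flatMap (tags : List (String × Int)) :
    map_CoNLL_tags_alt tags = (List.range tags.length).flatMap (blockF tags tags.length) := by
  rw [map_CoNLL_tags_alt]
  have h0 : ([] : List Nat) = (dropsSpec tags tags.length tags.length).reverse := by
    rw [dropsSpec]; simp
  rw [h0, loopB_eq tags tags.length tags.length le_rfl []]
  simp only [List.nil_append, List.reverse_flatMap, List.reverse_reverse]
  exact List.flatMap_congr (fun i _ => blockF_reverse tags tags.length i)

-- ===== VERDICT (by name: the statement is the Claim_ definition above) =====
theorem map_CoNLL_tags_spec : Claim_equal_map_CoNLL_tags := by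
  intro tags _
  unfold Spec_map_CoNLL_tags
  rw [mapA_eq_flatMap, mapB_eq_flatMap]
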